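-- pv_equiv track=rewrite | github.com/BigAngryDinosaur/amazonoa | maximum_greyness/solution.py | maxAcutance
-- ===== SOURCE A (Python) =====
-- def maxAcutance(image):
--     """
--     :type image: List[String]
--     :rtype: int
--     """
--     m, n = len(image), len(image[0])
--     row_counts = [[0, 0] for _ in range(m)]
--     col_counts = [[0, 0] for _ in range(n)]
--
--     for i in range(m):
--         for j in range(n):
--             if image[i][j] == "0":
--                 row_counts[i][0] += 1
--                 col_counts[j][0] += 1
--
--             else:
--                 row_counts[i][1] += 1
--                 col_counts[j][1] += 1
--
--     mx = -(m + n)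
--     for i in range(m):
--         for j in range(n):
--             ac = (row_counts[i][1] + col_counts[j][1]) - (
--                 row_counts[i][0] + col_counts[j][0]
--             )
--             mx = max(mx, ac)
--
--     return mx
-- ===== SOURCE B (Python) =====
-- def maxAcutance(image):
--     """
--     :type image: List[String]
--     :rtype: int
--     """
--     n = len(image[0])
--     col_diff = [0] * n
--     best_row = None
--     for row in image:
--         rd = 0
--         for j in range(n):
--             if row[j] == "0":
--                 rd -= 1
--                 col_diff[j] -= 1
--             else:
--                 rd += 1
--                 col_diff[j] += 1
--         if best_row is None or rd > best_row:
--             best_row = rd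
--     return best_row + max(col_diff)
-- ===== Notes on version B (the rewrite author's own statement) =====
-- stated objective: faster
-- what changed: B exploits that acutance (rowdiff[i]+coldiff[j]) is separable: it keeps a running best row difference and a column-difference array in one pass over the pixels and returns best_row + max(col_diff), replacing A's second O(m*n) scan over all (i,j) pairs (and its count-pair arrays) with an O(m+n)-state single pass.
-- outside the precondition, e.g. on maxAcutance(['']): A returns -1, B raises ValueError; on maxAcutance(['01', '0']): A raises IndexError, B raises IndexError
import Mathlib
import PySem

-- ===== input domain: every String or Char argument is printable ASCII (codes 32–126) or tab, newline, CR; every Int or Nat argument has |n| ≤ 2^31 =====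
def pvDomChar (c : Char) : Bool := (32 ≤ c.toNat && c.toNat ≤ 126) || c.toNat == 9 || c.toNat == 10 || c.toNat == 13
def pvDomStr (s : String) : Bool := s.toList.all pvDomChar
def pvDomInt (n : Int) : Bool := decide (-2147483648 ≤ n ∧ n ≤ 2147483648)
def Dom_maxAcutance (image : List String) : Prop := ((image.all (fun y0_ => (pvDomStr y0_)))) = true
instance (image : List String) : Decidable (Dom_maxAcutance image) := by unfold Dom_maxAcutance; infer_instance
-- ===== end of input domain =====

-- B replaces A's second O(m*n) scan over all (i,j) pairs by a single pass keeping the best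
-- row difference and a column-difference array, returning best_row + max(col_diff).

-- ===== PORT A =====
-- body of A's counting loop over j (for one fixed i), state = (row_counts, col_counts)
def pvA_count (image : List String) (n : Int) (st : List (Int × Int) × List (Int × Int))
    (i : Int) : List (Int × Int) × List (Int × Int) :=
  (PySem.List.pyRange 0 n 1).foldl (fun st j =>
    if PySem.List.pyGetD (PySem.List.pyGetD image i "").toList j ' ' = '0' then
      (PySem.List.pySetD st.1 i ((PySem.List.pyGetD st.1 i ((0:Int),(0:Int))).1 + 1,
                                 (PySem.List.pyGetD st.1 i ((0:Int),(0:Int))).2),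
       PySem.List.pySetD st.2 j ((PySem.List.pyGetD st.2 j ((0:Int),(0:Int))).1 + 1,
                                 (PySem.List.pyGetD st.2 j ((0:Int),(0:Int))).2))
    else
      (PySem.List.pySetD st.1 i ((PySem.List.pyGetD st.1 i ((0:Int),(0:Int))).1,
                                 (PySem.List.pyGetD st.1 i ((0:Int),(0:Int))).2 + 1),
       PySem.List.pySetD st.2 j ((PySem.List.pyGetD st.2 j ((0:Int),(0:Int))).1,
                                 (PySem.List.pyGetD st.2 j ((0:Int),(0:Int))).2 + 1))) st

-- body of A's max loop over j (for one fixed i)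
def pvA_mx (counts : List (Int × Int) × List (Int × Int)) (n : Int) (mx : Int) (i : Int) : Int :=
  (PySem.List.pyRange 0 n 1).foldl (fun mx j =>
    max mx (((PySem.List.pyGetD counts.1 i ((0:Int),(0:Int))).2 +
             (PySem.List.pyGetD counts.2 j ((0:Int),(0:Int))).2) -
            ((PySem.List.pyGetD counts.1 i ((0:Int),(0:Int))).1 +
             (PySem.List.pyGetD counts.2 j ((0:Int),(0:Int))).1))) mx

def maxAcutance (image : List String) : Int :=
  let m : Int := PySem.List.len image
  let n : Int := PySem.Str.len (PySem.List.pyGetD image 0 "")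
  let rowCounts : List (Int × Int) := (PySem.List.pyRange 0 m 1).map (fun _ => ((0:Int),(0:Int)))
  let colCounts : List (Int × Int) := (PySem.List.pyRange 0 n 1).map (fun _ => ((0:Int),(0:Int)))
  let counts := (PySem.List.pyRange 0 m 1).foldl (pvA_count image n) (rowCounts, colCounts)
  (PySem.List.pyRange 0 m 1).foldl (pvA_mx counts n) (-(m + n))

-- ===== PORT B =====
-- body of B's loop over one row: accumulates (rd, col_diff)
def pvB_row (row : String) (n : Int) (p : Int × List Int) : Int × List Int :=
  (PySem.List.pyRange 0 n 1).foldl (fun p j =>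
    if PySem.List.pyGetD row.toList j ' ' = '0' then
      (p.1 - 1, PySem.List.pySetD p.2 j (PySem.List.pyGetD p.2 j (0:Int) - 1))
    else
      (p.1 + 1, PySem.List.pySetD p.2 j (PySem.List.pyGetD p.2 j (0:Int) + 1))) p

def maxAcutance_alt (image : List String) : Int :=
  let n : Int := PySem.Str.len (PySem.List.pyGetD image 0 "")
  let st := image.foldl (fun (st : List Int × Option Int) row =>
      let p := pvB_row row n (0, st.1)
      match st.2 with
      | none => (p.2, some p.1)
      | some b => (p.2, if p.1 > b then some p.1 else some b))
    (PySem.List.pyRepeat [(0:Int)] n, none)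
  st.2.getD 0 + (PySem.List.max? st.1 (fun x => x)).getD 0

-- ===== PRECONDITION & SPEC =====
-- Pre_ excludes: the empty image and rows shorter than row 0 (A raises IndexError there), and
-- images whose first row is empty, where A's returned -(m) is an artefact of its sentinel and
-- B's natural max() raises ValueError.
def Pre_maxAcutance (image : List String) : Prop :=
  image ≠ [] ∧ 0 < (image.headD "").toList.length ∧
    ∀ s ∈ image, (image.headD "").toList.length ≤ s.toList.length
instance (image : List String) : Decidable (Pre_maxAcutance image) := by
  unfold Pre_maxAcutance; infer_instance
def pvWitness_maxAcutance : List String := ["01", "10"]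
def Spec_maxAcutance (image : List String) (out : Int) : Prop := out = maxAcutance_alt image
instance (image : List String) (out : Int) : Decidable (Spec_maxAcutance image out) := by
  unfold Spec_maxAcutance; infer_instance

-- ===== CLAIM (what is proved, stated in full; the proofs are below) =====
def Claim_equal_maxAcutance : Prop := ∀ (image : List String), Dom_maxAcutance image →
  Pre_maxAcutance image → Spec_maxAcutance image (maxAcutance image)

-- ===== ≤MMAS ∧ PROOFS =====

-- proof-side views of one pixel step
def pvBumpR (p : Int × Int) (c : Char) : Int × Int :=
  if c = '0' then (p.1 + 1, p.2) else (p.1, p.2 + 1)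
def pvBumpC (x : Int) (c : Char) : Int :=
  if c = '0' then x - 1 else x + 1
def pvDiff (p : Int × Int) : Int := p.2 - p.1
-- row difference of one row (first N characters)
def pvF (N : Nat) (s : String) : Int := (s.toList.take N).foldl pvBumpC 0
-- column count pairs / column differences accumulated over all rows
def pvColsA (image : List String) (c0 : List (Int × Int)) : List (Int × Int) :=
  image.foldl (fun cols s => List.zipWith pvBumpR cols s.toList) c0
def pvColsB (image : List String) (c0 : List Int) : List Int :=
  image.foldl (fun cols s => List.zipWith pvBumpC cols s.toList) c0
-- the two components of A's counting body (any i)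
def pvA_countR (image : List String) (n : Int) (a : List (Int × Int)) (i : Int) :
    List (Int × Int) :=
  (PySem.List.pyRange 0 n 1).foldl (fun a j =>
    if PySem.List.pyGetD (PySem.List.pyGetD image i "").toList j ' ' = '0' then
      PySem.List.pySetD a i ((PySem.List.pyGetD a i ((0:Int),(0:Int))).1 + 1,
                             (PySem.List.pyGetD a i ((0:Int),(0:Int))).2)
    else
      PySem.List.pySetD a i ((PySem.List.pyGetD a i ((0:Int),(0:Int))).1,
                             (PySem.List.pyGetD a i ((0:Int),(0:Int))).2 + 1)) a
def pvA_countC (image : List String) (n : Int) (b : List (Int × Int)) (i : Int) :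
    List (Int × Int) :=
  (PySem.List.pyRange 0 n 1).foldl (fun b j =>
    if PySem.List.pyGetD (PySem.List.pyGetD image i "").toList j ' ' = '0' then
      PySem.List.pySetD b j ((PySem.List.pyGetD b j ((0:Int),(0:Int))).1 + 1,
                             (PySem.List.pyGetD b j ((0:Int),(0:Int))).2)
    else
      PySem.List.pySetD b j ((PySem.List.pyGetD b j ((0:Int),(0:Int))).1,
                             (PySem.List.pyGetD b j ((0:Int),(0:Int))).2 + 1)) b

-- generic: a fold whose body acts componentwise splits into two folds
lemma foldl_prod_split {A B C : Type} (f : A × B → C → A × B) (g : A → C → A) (h : B → C → B)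
    (hf : ∀ a b x, f (a, b) x = (g a x, h b x)) :
    ∀ (l : List C) (a : A) (b : B), l.foldl f (a, b) = (l.foldl g a, l.foldl h b) := by
  intro l
  induction l with
  | nil => intro a b; rfl
  | cons x t ih => intro a b; simp only [List.foldl, hf a b x, ih]

-- generic: fold bodies that agree on states satisfying an invariant
lemma foldl_congr_inv {S C : Type} (P : S → Prop) (f g : S → C → S) (l : List C)
    (h : ∀ s x, P s → x ∈ l → f s x = g s x ∧ P (g s x)) :
    ∀ s, P s → l.foldl f s = l.foldl g s := by
  induction l with
  | nil => intro s _; rfl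
  | cons x t ih =>
      intro s hs
      have hx := h s x hs (by simp)
      simp only [List.foldl]
      rw [hx.1]
      exact ih (fun s x hs hm => h s x hs (by simp [hm])) _ hx.2

-- a fold that only ever writes index k
lemma foldl_set_single {A : Type} (k : Nat) (d : A) (g : Int → A → A) :
    ∀ (l : List Int) (rows : List A), k < rows.length →
      l.foldl (fun rows j => rows.set k (g j (rows.getD k d))) rows
        = rows.set k (l.foldl (fun p j => g j p) (rows.getD k d)) := by
  intro l
  induction l with
  | nil =>
      intro rows hk
      rw [List.getD_eq_getElem rows d hk]
      simp [List.set_getElem_self]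
  | cons x t ih =>
      intro rows hk
      simp only [List.foldl]
      rw [ih (rows.set k (g x (rows.getD k d))) (by simpa using hk)]
      rw [List.getD_eq_getElem rows d hk]
      rw [List.getD_eq_getElem _ d (by simp [hk])]
      rw [List.getElem_set_self, List.set_set]

-- positional update fold over a range = zipWith
lemma foldl_range_setcols {A B : Type} (u : A → B → A) (d : A) (e : B) (cs : List B) :
    ∀ (v pre : List A), pre.length + v.length ≤ cs.length →
      (PySem.List.pyRange (pre.length) (pre.length + v.length) 1).foldl
          (fun cols j => PySem.List.pySetD cols j
            (u (PySem.List.pyGetD cols j d) (PySem.List.pyGetD cs j e))) (pre ++ v)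
        = pre ++ List.zipWith u v (cs.drop pre.length) := by
  intro v
  induction v with
  | nil => intro pre h; simp [PySem.List.pyRange_one_eq_nil]
  | cons p v' ih =>
      intro pre h
      have hcs : pre.length < cs.length := by simp at h; omega
      rw [PySem.List.pyRange_one_cons (by push_cast [List.length_cons]; omega)]
      simp only [List.foldl]
      have hget : PySem.List.pyGetD (pre ++ p :: v') (pre.length : Int) d = p := by
        simp [PySem.List.pyGetD_natCast, List.getD_eq_getElem?_getD]
      have hgetcs : PySem.List.pyGetD cs (pre.length : Int) e = cs[pre.length] := by
        simp [PySem.List.pyGetD_natCast, List.getD_eq_getElem?_getD,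
          List.getElem?_eq_getElem hcs]
      have hset : PySem.List.pySetD (pre ++ p :: v') (pre.length : Int)
            (u p cs[pre.length]) = (pre ++ [u p cs[pre.length]]) ++ v' := by
        simp [PySem.List.pySetD_natCast]
      rw [hget, hgetcs, hset]
      have harith : ((pre.length : Int) + 1) = ((pre ++ [u p cs[pre.length]]).length : Int) := by
        push_cast [List.length_append, List.length_cons, List.length_nil]; ring
      have harith2 : (pre.length : Int) + ((p :: v').length : Int)
          = ((pre ++ [u p cs[pre.length]]).length : Int) + (v'.length : Int) := by
        push_cast [List.length_append, List.length_cons, List.length_nil]; ring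
      rw [harith, harith2, ih _ (by simp; omega)]
      rw [List.drop_eq_getElem_cons hcs]
      simp [List.zipWith]

-- a range-indexed fold over the first N characters is a fold over take N
lemma foldl_take_body {A : Type} (cs : List Char) (N : Nat) (hrow : N ≤ cs.length)
    (f : A → Char → A) :
    ∀ x, (PySem.List.pyRange 0 (N : Int) 1).foldl
        (fun p j => f p (PySem.List.pyGetD cs j ' ')) x
      = (cs.take N).foldl f x := by
  intro x
  have htake : (PySem.List.pyRange 0 (N : Int) 1).foldl
      (fun p j => f p (PySem.List.pyGetD cs j ' ')) x
      = (PySem.List.pyRange 0 (N : Int) 1).foldl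
      (fun p j => f p (PySem.List.pyGetD (cs.take N) j ' ')) x := by
    apply foldl_congr_inv (P := fun _ => True) _ _ _ _ _ trivial
    intro s j _ hj
    refine ⟨?_, trivial⟩
    rw [PySem.List.mem_pyRange_one] at hj
    have hjN : j.toNat < N := by omega
    rw [PySem.List.pyGetD_eq_getElem _ _ (by omega) (by omega),
        PySem.List.pyGetD_eq_getElem _ _ (by omega)
          (by push_cast [List.length_take]; omega)]
    rw [List.getElem_take]
  rw [htake]
  have hlen : ((N : Nat) : Int) = ((cs.take N).length : Int) := by
    simp [List.length_take]; omega
  rw [hlen, PySem.List.foldl_pyRange_zero_pyGetD' (cs.take N) ' ' f x]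

-- A's row-count component, at a valid index
lemma pvA_countR_eq (image : List String) (N k : Nat) (a : List (Int × Int))
    (hk : k < a.length) (hrow : N ≤ (image.getD k "").toList.length) :
    pvA_countR image (N : Int) a (k : Int)
      = a.set k (((image.getD k "").toList.take N).foldl pvBumpR (a.getD k (0, 0))) := by
  unfold pvA_countR
  have hbody : (fun (a : List (Int × Int)) (j : Int) =>
      if PySem.List.pyGetD (PySem.List.pyGetD image (k : Int) "").toList j ' ' = '0' then
        PySem.List.pySetD a (k : Int) ((PySem.List.pyGetD a (k : Int) ((0:Int),(0:Int))).1 + 1,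
                               (PySem.List.pyGetD a (k : Int) ((0:Int),(0:Int))).2)
      else
        PySem.List.pySetD a (k : Int) ((PySem.List.pyGetD a (k : Int) ((0:Int),(0:Int))).1,
                               (PySem.List.pyGetD a (k : Int) ((0:Int),(0:Int))).2 + 1))
      = (fun a j => a.set k (pvBumpR (a.getD k ((0:Int),(0:Int)))
          (PySem.List.pyGetD (image.getD k "").toList j ' '))) := by
    funext a j
    simp only [PySem.List.pyGetD_natCast, PySem.List.pySetD_natCast, pvBumpR,
      List.getD_eq_getElem?_getD]
    split <;> rfl
  rw [hbody]
  rw [foldl_set_single k ((0:Int),(0:Int))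
    (fun j p => pvBumpR p (PySem.List.pyGetD (image.getD k "").toList j ' ')) _ a hk]
  congr 1
  exact foldl_take_body _ N hrow pvBumpR _
-- A's column-count component, at a valid index
lemma pvA_countC_eq (image : List String) (N k : Nat) (b : List (Int × Int))
    (hb : b.length = N) (hrow : N ≤ (image.getD k "").toList.length) :
    pvA_countC image (N : Int) b (k : Int)
      = List.zipWith pvBumpR b (image.getD k "").toList := by
  unfold pvA_countC
  have hbody : (fun (b : List (Int × Int)) (j : Int) =>
      if PySem.List.pyGetD (PySem.List.pyGetD image (k : Int) "").toList j ' ' = '0' then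
        PySem.List.pySetD b j ((PySem.List.pyGetD b j ((0:Int),(0:Int))).1 + 1,
                               (PySem.List.pyGetD b j ((0:Int),(0:Int))).2)
      else
        PySem.List.pySetD b j ((PySem.List.pyGetD b j ((0:Int),(0:Int))).1,
                               (PySem.List.pyGetD b j ((0:Int),(0:Int))).2 + 1))
      = (fun cols j => PySem.List.pySetD cols j
          (pvBumpR (PySem.List.pyGetD cols j ((0:Int),(0:Int)))
            (PySem.List.pyGetD (image.getD k "").toList j ' '))) := by
    funext b j
    simp only [PySem.List.pyGetD_natCast, pvBumpR]
    split <;> rfl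
  rw [hbody]
  have h := foldl_range_setcols pvBumpR ((0:Int),(0:Int)) ' ' (image.getD k "").toList b []
    (by simpa [hb] using hrow)
  simp only [List.length_nil, Nat.cast_zero, zero_add, List.nil_append, List.drop_zero] at h
  rw [hb] at h
  exact h
-- A's counting body splits componentwise
lemma pvA_count_split (image : List String) (n : Int) (a b : List (Int × Int)) (i : Int) :
    pvA_count image n (a, b) i = (pvA_countR image n a i, pvA_countC image n b i) := by
  apply foldl_prod_split
  intro a b x
  by_cases h : PySem.List.pyGetD (PySem.List.pyGetD image i "").toList x ' ' = '0' <;>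
    simp [h]

-- B's row body, at a valid state
lemma pvB_row_eq (row : String) (N : Nat) (rd0 : Int) (cols : List Int)
    (hcols : cols.length = N) (hrow : N ≤ row.toList.length) :
    pvB_row row (N : Int) (rd0, cols)
      = ((row.toList.take N).foldl pvBumpC rd0, List.zipWith pvBumpC cols row.toList) := by
  unfold pvB_row
  rw [foldl_prod_split _
    (fun a j => if PySem.List.pyGetD row.toList j ' ' = '0' then a - 1 else a + 1)
    (fun b j => if PySem.List.pyGetD row.toList j ' ' = '0' then
        PySem.List.pySetD b j (PySem.List.pyGetD b j (0:Int) - 1)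
      else PySem.List.pySetD b j (PySem.List.pyGetD b j (0:Int) + 1))
    (by intro a b x; by_cases h : PySem.List.pyGetD row.toList x ' ' = '0' <;> simp [h])]
  rw [Prod.mk.injEq]
  constructor
  · have hbody : (fun (a : Int) (j : Int) =>
        if PySem.List.pyGetD row.toList j ' ' = '0' then a - 1 else a + 1)
        = (fun a j => pvBumpC a (PySem.List.pyGetD row.toList j ' ')) := by
      funext a j; simp only [pvBumpC]
    rw [hbody, foldl_take_body _ N hrow pvBumpC rd0]
  · have hbody : (fun (b : List Int) (j : Int) =>
        if PySem.List.pyGetD row.toList j ' ' = '0' then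
          PySem.List.pySetD b j (PySem.List.pyGetD b j (0:Int) - 1)
        else PySem.List.pySetD b j (PySem.List.pyGetD b j (0:Int) + 1))
        = (fun cols j => PySem.List.pySetD cols j
            (pvBumpC (PySem.List.pyGetD cols j (0:Int))
              (PySem.List.pyGetD row.toList j ' '))) := by
      funext b j; simp only [pvBumpC]; split <;> rfl
    rw [hbody]
    have h := foldl_range_setcols pvBumpC (0:Int) ' ' row.toList cols []
      (by simpa [hcols] using hrow)
    simp only [List.length_nil, Nat.cast_zero, zero_add, List.nil_append, List.drop_zero] at h
    rw [hcols] at h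
    exact h
-- zipWith over a replicate of matching length is a map
lemma zipWith_replicate_map {A B : Type} (u : A → B → A) (aa : A) :
    ∀ (l : List B), List.zipWith u (List.replicate l.length aa) l = l.map (u aa) := by
  intro l; induction l with
  | nil => rfl
  | cons x t ih => simp [List.replicate_succ, ih]

-- pvDiff intertwines the two bump operations
lemma diff_bump (p : Int × Int) (c : Char) : pvDiff (pvBumpR p c) = pvBumpC (pvDiff p) c := by
  unfold pvBumpR pvBumpC pvDiff; split_ifs <;> simp <;> ring

lemma diff_foldl_bump : ∀ (cs : List Char) (p : Int × Int),
    pvDiff (cs.foldl pvBumpR p) = cs.foldl pvBumpC (pvDiff p) := by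
  intro cs
  induction cs with
  | nil => intro p; rfl
  | cons c t ih => intro p; simp only [List.foldl]; rw [ih, diff_bump]

lemma zipWith_map_diff : ∀ (cols : List (Int × Int)) (cs : List Char),
    (List.zipWith pvBumpR cols cs).map pvDiff
      = List.zipWith pvBumpC (cols.map pvDiff) cs := by
  intro cols
  induction cols with
  | nil => intro cs; rfl
  | cons p t ih =>
      intro cs
      cases cs with
      | nil => rfl
      | cons c cs' => simp [ih, diff_bump]

lemma pvColsA_map_diff : ∀ (image : List String) (c0 : List (Int × Int)),
    (pvColsA image c0).map pvDiff = pvColsB image (c0.map pvDiff) := by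
  intro image
  induction image with
  | nil => intro c0; rfl
  | cons s t ih =>
      intro c0
      simp only [pvColsA, pvColsB, List.foldl] at *
      rw [ih, zipWith_map_diff]

lemma pvColsB_length : ∀ (image : List String) (c0 : List Int),
    (∀ s ∈ image, c0.length ≤ s.toList.length) → (pvColsB image c0).length = c0.length := by
  intro image
  induction image with
  | nil => intro c0 _; rfl
  | cons s t ih =>
      intro c0 h
      have h1 : c0.length ≤ s.toList.length := h s (by simp)
      have h2 : (List.zipWith pvBumpC c0 s.toList).length = c0.length := by
        rw [List.length_zipWith]; exact Nat.min_eq_left h1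
      simp only [pvColsB, List.foldl]
      rw [show (List.foldl (fun cols s => List.zipWith pvBumpC cols s.toList) (List.zipWith pvBumpC c0 s.toList) t) = pvColsB t (List.zipWith pvBumpC c0 s.toList) from rfl]
      rw [ih _ (fun s hs => by rw [h2]; exact h s (by simp [hs]))]
      exact h2

lemma bumpC_ge (x : Int) (c : Char) : x - 1 ≤ pvBumpC x c := by
  unfold pvBumpC; split_ifs <;> omega

lemma pvColsB_bound : ∀ (image : List String) (c0 : List Int) (b : Int),
    (∀ y ∈ c0, b ≤ y) → ∀ x ∈ pvColsB image c0, b - image.length ≤ x := by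
  intro image
  induction image with
  | nil => intro c0 b h x hx; simpa using h x hx
  | cons s t ih =>
      intro c0 b h x hx
      have hstep : ∀ y ∈ List.zipWith pvBumpC c0 s.toList, b - 1 ≤ y := by
        intro y hy
        rw [List.mem_iff_getElem] at hy
        obtain ⟨i, hi, rfl⟩ := hy
        rw [List.getElem_zipWith]
        have h1 := h (c0[i]'(by simp [List.length_zipWith] at hi; omega)) (by simp)
        have h2 := bumpC_ge (c0[i]'(by simp [List.length_zipWith] at hi; omega)) (s.toList[i]'(by simp [List.length_zipWith] at hi ⊢; omega))
        omega
      have := ih (List.zipWith pvBumpC c0 s.toList) (b - 1) hstep x hx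
      have hl : (((s :: t).length : Nat) : Int) = (t.length : Int) + 1 := by
        push_cast [List.length_cons]; ring
      omega
lemma foldl_bumpC_ge : ∀ (cs : List Char) (x : Int), x - cs.length ≤ cs.foldl pvBumpC x := by
  intro cs
  induction cs with
  | nil => intro x; simp
  | cons c t ih =>
      intro x
      have h1 := ih (pvBumpC x c)
      have h2 := bumpC_ge x c
      have hl : ((c :: t).length : Int) = (t.length : Int) + 1 := by push_cast [List.length_cons]; ring
      simp only [List.foldl]
      omega

lemma pvF_ge (N : Nat) (s : String) : -(N : Int) ≤ pvF N s := by
  unfold pvF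
  have h := foldl_bumpC_ge (s.toList.take N) 0
  have h2 : (s.toList.take N).length ≤ N := by simp
  have h3 : (((s.toList.take N).length : Nat) : Int) ≤ (N : Int) := by exact_mod_cast h2
  omega

-- separability of the running max
lemma max_fold_inner (dv : Int) : ∀ (E' : List Int) (mx e0 : Int),
    E'.foldl (fun a e => max a (dv + e)) (max mx (dv + e0)) = max mx (dv + E'.foldl max e0) := by
  intro E'
  induction E' with
  | nil => intro mx e0; rfl
  | cons e t ih =>
      intro mx e0
      simp only [List.foldl]
      rw [max_assoc, max_add_add_left, ih]

lemma nested_max (d0 e0 : Int) (D' E' : List Int) (init : Int) :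
    (d0 :: D').foldl (fun mx dd => (e0 :: E').foldl (fun a e => max a (dd + e)) mx) init
      = max init (D'.foldl max d0 + E'.foldl max e0) := by
  have hinner : ∀ (mx dd : Int), (e0 :: E').foldl (fun a e => max a (dd + e)) mx
      = max mx (dd + E'.foldl max e0) := by
    intro mx dd
    simp only [List.foldl]
    exact max_fold_inner dd E' mx e0
  have hbody : (fun (mx dd : Int) => (e0 :: E').foldl (fun a e => max a (dd + e)) mx)
      = (fun mx dd => max mx (E'.foldl max e0 + dd)) := by
    funext mx dd; rw [hinner, add_comm]
  rw [hbody]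
  simp only [List.foldl]
  rw [max_fold_inner (E'.foldl max e0) D' init d0, add_comm]
-- the best-row option fold is a running max
lemma foldl_optmax {A : Type} (f : A → Int) : ∀ (l : List A) (b : Int),
    l.foldl (fun ob r => match ob with
      | none => some (f r)
      | some bb => if f r > bb then some (f r) else some bb) (some b)
      = some ((l.map f).foldl max b) := by
  intro l
  induction l with
  | nil => intro b; rfl
  | cons r t ih =>
      intro b
      simp only [List.foldl, List.map]
      rw [show (if f r > b then some (f r) else some b) = some (max b (f r)) by
        split_ifs with h
        . rw [max_eq_right (by omega)]
        . rw [max_eq_left (by omega)]]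
      exact ih (max b (f r))

-- running max of a nonempty list (0 on [])
def pvLmax : List Int → Int
  | [] => 0
  | x :: t => t.foldl max x

lemma portB_eq (image : List String) (N : Nat) (hne : image ≠ [])
    (hn : (PySem.Str.len (PySem.List.pyGetD image 0 "")) = (N : Int)) (hN : 0 < N)
    (hrows : ∀ s ∈ image, N ≤ s.toList.length) :
    maxAcutance_alt image
      = pvLmax (image.map (pvF N)) + pvLmax (pvColsB image (List.replicate N 0)) := by
  obtain ⟨s0, rest, rfl⟩ : ∃ s0 rest, image = s0 :: rest := by
    cases image with
    | nil => exact absurd rfl hne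
    | cons a t => exact ⟨a, t, rfl⟩
  show (let n := PySem.Str.len (PySem.List.pyGetD (s0::rest) 0 "")
        let st := (s0::rest).foldl (fun (st : List Int × Option Int) row =>
            let p := pvB_row row n (0, st.1)
            match st.2 with
            | none => (p.2, some p.1)
            | some b => (p.2, if p.1 > b then some p.1 else some b))
          (PySem.List.pyRepeat [(0:Int)] n, none)
        st.2.getD 0 + (PySem.List.max? st.1 (fun x => x)).getD 0) = _
  simp only [hn]
  have hinit : PySem.List.pyRepeat [(0:Int)] (N : Int) = List.replicate N 0 := by
    rw [PySem.List.pyRepeat_singleton]; simp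
  rw [hinit]
  have hfold : (s0::rest).foldl (fun (st : List Int × Option Int) row =>
      let p := pvB_row row (N:Int) (0, st.1)
      match st.2 with
      | none => (p.2, some p.1)
      | some b => (p.2, if p.1 > b then some p.1 else some b)) (List.replicate N 0, none)
    = (s0::rest).foldl (fun st row =>
        (List.zipWith pvBumpC st.1 row.toList,
         match st.2 with
         | none => some (pvF N row)
         | some b => if pvF N row > b then some (pvF N row) else some b))
      (List.replicate N 0, none) := by
    apply foldl_congr_inv (P := fun (st : List Int × Option Int) => st.1.length = N)
      _ _ _ ?_ _ (by simp)
    intro st row hst hmem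
    refine ⟨?_, ?_⟩
    · obtain ⟨a, ob⟩ := st
      simp only at hst
      simp only [pvB_row_eq row N 0 a hst (hrows row hmem)]
      cases ob <;> rfl
    · simp only [List.length_zipWith]
      have := hrows row hmem
      simp at this ⊢
      omega
  rw [hfold]
  rw [foldl_prod_split _
    (fun (a : List Int) (row : String) => List.zipWith pvBumpC a row.toList)
    (fun (ob : Option Int) (row : String) => match ob with
      | none => some (pvF N row)
      | some b => if pvF N row > b then some (pvF N row) else some b)
    (by intro a b x; cases b <;> rfl)]
  have hsnd : (s0::rest).foldl (fun (ob : Option Int) (row : String) => match ob with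
      | none => some (pvF N row)
      | some b => if pvF N row > b then some (pvF N row) else some b) none
      = some (pvLmax ((s0::rest).map (pvF N))) := by
    simp only [List.foldl]
    rw [foldl_optmax (pvF N) rest (pvF N s0)]
    rfl
  have hfst : (s0::rest).foldl (fun (a : List Int) (row : String) =>
      List.zipWith pvBumpC a row.toList) (List.replicate N 0)
      = pvColsB (s0::rest) (List.replicate N 0) := rfl
  rw [hsnd, hfst]
  have hElen : (pvColsB (s0::rest) (List.replicate N 0)).length = N := by
    rw [pvColsB_length _ _ (fun s hs => by simpa using hrows s hs)]
    simp
  obtain ⟨e0, E', hE⟩ : ∃ e0 E', pvColsB (s0::rest) (List.replicate N 0) = e0 :: E' := by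
    cases hEl : pvColsB (s0::rest) (List.replicate N 0) with
    | nil => rw [hEl] at hElen; simp at hElen; omega
    | cons e0 E' => exact ⟨e0, E', rfl⟩
  rw [hE]
  rw [PySem.List.max?_id_cons]
  rfl

lemma portA_eq (image : List String) (N : Nat) (hne : image ≠ [])
    (hn : (PySem.Str.len (PySem.List.pyGetD image 0 "")) = (N : Int)) (hN : 0 < N)
    (hrows : ∀ s ∈ image, N ≤ s.toList.length) :
    maxAcutance image
      = max (-((image.length : Int) + (N : Int)))
          (pvLmax (image.map (pvF N)) + pvLmax (pvColsB image (List.replicate N 0))) := by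
  have hgetmem : ∀ k : Nat, k < image.length → image.getD k "" ∈ image := by
    intro k hk
    rw [List.getD_eq_getElem image "" hk]
    exact List.getElem_mem hk
  show (let m : Int := PySem.List.len image
        let n : Int := PySem.Str.len (PySem.List.pyGetD image 0 "")
        let rowCounts : List (Int × Int) := (PySem.List.pyRange 0 m 1).map (fun _ => ((0:Int),(0:Int)))
        let colCounts : List (Int × Int) := (PySem.List.pyRange 0 n 1).map (fun _ => ((0:Int),(0:Int)))
        let counts := (PySem.List.pyRange 0 m 1).foldl (pvA_count image n) (rowCounts, colCounts)
        (PySem.List.pyRange 0 m 1).foldl (pvA_mx counts n) (-(m + n))) = _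
  simp only [hn, PySem.List.len_eq]
  have hr0 : (PySem.List.pyRange 0 (image.length : Int) 1).map (fun _ => ((0:Int),(0:Int)))
      = List.replicate image.length ((0:Int),(0:Int)) := by
    rw [List.map_const']
    simp [PySem.List.length_pyRange_one]
  have hc0 : (PySem.List.pyRange 0 (N : Int) 1).map (fun _ => ((0:Int),(0:Int)))
      = List.replicate N ((0:Int),(0:Int)) := by
    rw [List.map_const']
    simp [PySem.List.length_pyRange_one]
  rw [hr0, hc0]
  rw [foldl_prod_split (pvA_count image (N : Int)) (pvA_countR image (N : Int))
    (pvA_countC image (N : Int)) (fun a b i => pvA_count_split image (N : Int) a b i)]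
  -- the row-count fold
  have hrowsF : (PySem.List.pyRange 0 (image.length : Int) 1).foldl (pvA_countR image (N : Int))
      (List.replicate image.length ((0:Int),(0:Int)))
      = image.map (fun s => (s.toList.take N).foldl pvBumpR ((0:Int),(0:Int))) := by
    rw [foldl_congr_inv (P := fun (a : List (Int × Int)) => a.length = image.length)
      (pvA_countR image (N : Int))
      (fun a i => PySem.List.pySetD a i
        (((PySem.List.pyGetD image i "").toList.take N).foldl pvBumpR
          (PySem.List.pyGetD a i ((0:Int),(0:Int))))) _ ?_ _ (by simp)]
    · have h := foldl_range_setcols (fun (p : Int × Int) (s : String) => (s.toList.take N).foldl pvBumpR p)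
        ((0:Int),(0:Int)) "" image (List.replicate image.length ((0:Int),(0:Int))) [] (by simp)
      simp only [List.length_nil, Nat.cast_zero, zero_add, List.nil_append, List.drop_zero,
        List.length_replicate] at h
      rw [h]
      have := zipWith_replicate_map (fun (p : Int × Int) (s : String) => (s.toList.take N).foldl pvBumpR p)
        ((0:Int),(0:Int)) image
      simpa using this
    · intro a i ha hi
      rw [PySem.List.mem_pyRange_one] at hi
      obtain ⟨k, rfl⟩ : ∃ k : Nat, i = (k : Int) := ⟨i.toNat, by omega⟩
      constructor
      · rw [pvA_countR_eq image N k a (by omega) (hrows _ (hgetmem k (by omega)))]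
        simp
      · simp [ha]
  -- the column-count fold
  have hcolsF : (PySem.List.pyRange 0 (image.length : Int) 1).foldl (pvA_countC image (N : Int))
      (List.replicate N ((0:Int),(0:Int)))
      = pvColsA image (List.replicate N ((0:Int),(0:Int))) := by
    rw [foldl_congr_inv (P := fun (b : List (Int × Int)) => b.length = N)
      (pvA_countC image (N : Int))
      (fun b i => List.zipWith pvBumpR b (PySem.List.pyGetD image i "").toList) _ ?_ _ (by simp)]
    · exact PySem.List.foldl_pyRange_zero_pyGetD' image ""
        (fun b (s : String) => List.zipWith pvBumpR b s.toList) _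
    · intro b i hb hi
      rw [PySem.List.mem_pyRange_one] at hi
      obtain ⟨k, rfl⟩ : ∃ k : Nat, i = (k : Int) := ⟨i.toNat, by omega⟩
      have hrow := hrows _ (hgetmem k (by omega))
      constructor
      · rw [pvA_countC_eq image N k b hb hrow]
        simp
      · simp only [List.length_zipWith]
        simp at hrow ⊢
        omega
  rw [hrowsF, hcolsF]
  have hClen : (pvColsA image (List.replicate N ((0:Int),(0:Int)))).length = N := by
    have h1 := congrArg List.length (pvColsA_map_diff image (List.replicate N ((0:Int),(0:Int))))
    simp only [List.length_map] at h1
    rw [h1, pvColsB_length _ _ (fun s hs => by simpa using hrows s hs)]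
    simp
  have hE : (pvColsA image (List.replicate N ((0:Int),(0:Int)))).map pvDiff
      = pvColsB image (List.replicate N 0) := by
    rw [pvColsA_map_diff]
    congr 1
    simp [pvDiff]
  have hD : (image.map (fun s => List.foldl pvBumpR (0, 0) (List.take N s.toList))).map pvDiff
      = image.map (pvF N) := by
    rw [List.map_map]
    apply List.map_congr_left
    intro s _
    show pvDiff (List.foldl pvBumpR (0, 0) (List.take N s.toList)) = pvF N s
    rw [diff_foldl_bump]
    rfl
  have hinner : ∀ (r : Int × Int) (mx : Int),
      (pvColsA image (List.replicate N ((0:Int),(0:Int)))).foldl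
        (fun acc c => max acc ((r.2 + c.2) - (r.1 + c.1))) mx
      = (pvColsB image (List.replicate N 0)).foldl (fun a e => max a (pvDiff r + e)) mx := by
    intro r mx
    rw [← hE, List.foldl_map]
    congr 1
    funext a c
    congr 1
    unfold pvDiff
    ring
  have hmx : pvA_mx (image.map (fun s => List.foldl pvBumpR (0, 0) (List.take N s.toList)),
      pvColsA image (List.replicate N ((0:Int),(0:Int)))) (N : Int)
      = (fun mx i => (pvColsB image (List.replicate N 0)).foldl
          (fun a e => max a (pvDiff (PySem.List.pyGetD
            (image.map (fun s => List.foldl pvBumpR (0, 0) (List.take N s.toList))) i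
            ((0:Int),(0:Int))) + e)) mx) := by
    funext mx i
    unfold pvA_mx
    rw [show ((N : Nat) : Int) = ((pvColsA image (List.replicate N ((0:Int),(0:Int)))).length : Int) by
      rw [hClen]]
    rw [PySem.List.foldl_pyRange_zero_pyGetD' (pvColsA image (List.replicate N ((0:Int),(0:Int))))
      ((0:Int),(0:Int))
      (fun acc c => max acc (((PySem.List.pyGetD
        (image.map (fun s => List.foldl pvBumpR (0, 0) (List.take N s.toList))) i
        ((0:Int),(0:Int))).2 + c.2)
        - ((PySem.List.pyGetD
        (image.map (fun s => List.foldl pvBumpR (0, 0) (List.take N s.toList))) i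
        ((0:Int),(0:Int))).1 + c.1))) mx]
    exact hinner _ mx
  rw [hmx]
  rw [show ((image.length : Nat) : Int)
      = ((image.map (fun s => List.foldl pvBumpR (0, 0) (List.take N s.toList))).length : Int) by
    simp]
  rw [PySem.List.foldl_pyRange_zero_pyGetD'
    (image.map (fun s => List.foldl pvBumpR (0, 0) (List.take N s.toList))) ((0:Int),(0:Int))
    (fun mx r => (pvColsB image (List.replicate N 0)).foldl
      (fun a e => max a (pvDiff r + e)) mx) _]
  rw [show (List.foldl (fun mx r => (pvColsB image (List.replicate N 0)).foldl
        (fun a e => max a (pvDiff r + e)) mx)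
        (-(((image.map (fun s => List.foldl pvBumpR (0, 0) (List.take N s.toList))).length : Int) + (N:Int)))
        (image.map (fun s => List.foldl pvBumpR (0, 0) (List.take N s.toList))))
      = (((image.map (fun s => List.foldl pvBumpR (0, 0) (List.take N s.toList))).map pvDiff).foldl
        (fun mx dd => (pvColsB image (List.replicate N 0)).foldl
          (fun a e => max a (dd + e)) mx)
        (-(((image.map (fun s => List.foldl pvBumpR (0, 0) (List.take N s.toList))).length : Int) + (N:Int))))
    from (List.foldl_map (f := pvDiff)
      (g := fun mx dd => (pvColsB image (List.replicate N 0)).foldl (fun a e => max a (dd + e)) mx)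
      (l := image.map (fun s => List.foldl pvBumpR (0, 0) (List.take N s.toList)))
      (init := -(((image.map (fun s => List.foldl pvBumpR (0, 0) (List.take N s.toList))).length : Int) + (N:Int)))).symm]
  rw [hD]
  simp only [List.length_map]
  obtain ⟨s0, rest, rfl⟩ : ∃ s0 rest, image = s0 :: rest := by
    cases image with
    | nil => exact absurd rfl hne
    | cons a t => exact ⟨a, t, rfl⟩
  obtain ⟨e0, E', hEc⟩ : ∃ e0 E', pvColsB (s0 :: rest) (List.replicate N 0) = e0 :: E' := by
    cases hEl : pvColsB (s0 :: rest) (List.replicate N 0) with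
    | nil =>
        have := pvColsB_length (s0 :: rest) (List.replicate N 0)
          (fun s hs => by simpa using hrows s hs)
        rw [hEl] at this
        simp at this
        omega
    | cons e0 E' => exact ⟨e0, E', rfl⟩
  rw [hEc]
  simp only [List.map_cons]
  rw [nested_max]
  rfl

-- ===== VERDICT (by name: the statement is the Claim_ definition above) =====
theorem maxAcutance_spec : Claim_equal_maxAcutance := by
  intro image hdom hpre
  unfold Spec_maxAcutance
  obtain ⟨hne, hN, hrows⟩ := hpre
  have hn : PySem.Str.len (PySem.List.pyGetD image 0 "")
      = (((image.headD "").toList.length : Nat) : Int) := by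
    cases image with
    | nil => exact absurd rfl hne
    | cons s0 rest => simp [PySem.Str.len_eq]
  rw [portA_eq image (image.headD "").toList.length hne hn hN hrows,
      portB_eq image (image.headD "").toList.length hne hn hN hrows]
  apply max_eq_right
  obtain ⟨s0, rest, rfl⟩ : ∃ s0 rest, image = s0 :: rest := by
    cases image with
    | nil => exact absurd rfl hne
    | cons a t => exact ⟨a, t, rfl⟩
  set N := ((s0 :: rest).headD "").toList.length with hNdef
  obtain ⟨e0, E', hEc⟩ : ∃ e0 E', pvColsB (s0 :: rest) (List.replicate N 0) = e0 :: E' := by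
    cases hEl : pvColsB (s0 :: rest) (List.replicate N 0) with
    | nil =>
        have := pvColsB_length (s0 :: rest) (List.replicate N 0)
          (fun s hs => by simpa using hrows s hs)
        rw [hEl] at this
        simp at this
        omega
    | cons e0 E' => exact ⟨e0, E', rfl⟩
  have hDbound : -(N:Int) ≤ pvLmax ((s0 :: rest).map (pvF N)) := by
    have h1 := pvF_ge N s0
    have h2 := (PySem.List.le_foldl_max ((rest).map (pvF N)) (pvF N s0)).1
    simp only [List.map_cons, pvLmax]
    omega
  have hEbound : -(((s0 :: rest).length : Nat) : Int) ≤ pvLmax (pvColsB (s0 :: rest) (List.replicate N 0)) := by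
    have hmem : e0 ∈ pvColsB (s0 :: rest) (List.replicate N 0) := by rw [hEc]; simp
    have h1 := pvColsB_bound (s0 :: rest) (List.replicate N 0) 0
      (fun y hy => by simp [List.eq_of_mem_replicate hy]) e0 hmem
    have h2 := (PySem.List.le_foldl_max E' e0).1
    rw [hEc]
    simp only [pvLmax]
    omega
  have hlen : (((s0 :: rest).length : Nat) : Int) = ((rest.length : Nat) : Int) + 1 := by
    push_cast [List.length_cons]; ring
  omega
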